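-- pv_equiv track=rewrite | github.com/Vovan2s228/projects | Algorithms/equal_subset_sum.py | ess_all
-- ===== SOURCE A (Python) =====
-- def ess_all(data, left, right, backtracking=False):
--     """
--     One Divide & Conquer step for the equal subset sum problem to find all solutions.
--
--     :param data: The original list with the values
--     :type data: list[int]
--     :param left: The left sub list.
--     :type left: list[int]
--     :param right: The right sub list.
--     :type right: list[int]
--     :param backtracking: If backtracking is enabled or not
--     :type backtracking: bool
--     :return: Two list of equal sum or two empty lists.
--     :rtype: list[tuple[list[int], list[int]]] or list[]
--     """
--     if len(data) == 0:
--         if sum(left) == sum(right):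
--             return [(left.copy(), right.copy())]
--         else:
--             return []
--     if backtracking:
--         if sum(left) - sum(right) > sum(data):
--             return []
--         if sum(right) - sum(left) > sum(data):
--             return []
--         left.append(data[0])
--         result = ess_all(data[1:], left, right, backtracking)
--         left.pop()
--         right.append(data[0])
--         result += ess_all(data[1:], left, right, backtracking)
--         right.pop()
--     else:
--         left.append(data[0])
--         result = ess_all(data[1:], left, right, backtracking)
--         left.pop()
--         right.append(data[0])
--         result += ess_all(data[1:], left, right, backtracking)
--         right.pop()
--
--     return result
-- ===== SOURCE B (Python) =====
-- def ess_all(data, left, right, backtracking=False):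
--     """Iterative explicit-stack DFS; never mutates the caller's lists."""
--     out = []
--     stack = [(list(data), list(left), list(right))]
--     while stack:
--         rest, L, R = stack.pop()
--         if not rest:
--             if sum(L) == sum(R):
--                 out.append((L, R))
--             continue
--         if backtracking and (sum(L) - sum(R) > sum(rest) or sum(R) - sum(L) > sum(rest)):
--             continue
--         x = rest[0]
--         tail = rest[1:]
--         stack.append((tail, L, R + [x]))
--         stack.append((tail, L + [x], R))
--     return out
-- ===== Notes on version B (the rewrite author's own statement) =====
-- stated objective: alternative
-- what changed: Replaced the mutating recursive DFS with an iterative explicit-stack loop carrying immutable per-node (rest, left, right) snapshots (right child pushed first so the left branch is emitted first, matching A's order), with the same pruning tests.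
import Mathlib
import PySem

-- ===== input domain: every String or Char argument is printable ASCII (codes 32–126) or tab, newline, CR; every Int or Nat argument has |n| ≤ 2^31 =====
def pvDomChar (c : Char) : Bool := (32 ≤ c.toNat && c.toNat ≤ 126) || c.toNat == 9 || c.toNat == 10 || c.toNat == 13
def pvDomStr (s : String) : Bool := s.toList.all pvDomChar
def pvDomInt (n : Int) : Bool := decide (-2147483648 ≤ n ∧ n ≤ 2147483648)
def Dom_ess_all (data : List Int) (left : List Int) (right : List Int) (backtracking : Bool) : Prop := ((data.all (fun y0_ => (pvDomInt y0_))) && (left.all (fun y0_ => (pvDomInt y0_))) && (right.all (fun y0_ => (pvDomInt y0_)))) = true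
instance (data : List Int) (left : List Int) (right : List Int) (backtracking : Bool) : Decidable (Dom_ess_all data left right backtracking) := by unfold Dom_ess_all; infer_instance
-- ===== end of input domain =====

-- B replaces the mutating recursive DFS of A by an iterative explicit-stack loop over (rest, left, right) snapshots (alternative decomposition; A mutates left/right in place but restores them — the equivalence proved is about the return value).


-- ===== PORT A =====
def ess_all (data : List Int) (left : List Int) (right : List Int) (backtracking : Bool) : List (List Int × List Int) :=
  match data with
  | [] => if left.sum = right.sum then [(left, right)] else []
  | x :: rest =>
    if backtracking then
      if left.sum - right.sum > x + rest.sum then []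
      else if right.sum - left.sum > x + rest.sum then []
      else ess_all rest (left ++ [x]) right backtracking ++ ess_all rest left (right ++ [x]) backtracking
    else
      ess_all rest (left ++ [x]) right backtracking ++ ess_all rest left (right ++ [x]) backtracking

-- ===== PORT B =====
-- B-side helper: the explicit-stack loop of Source B (stack of (rest, L, R) snapshots, accumulator out)
def essLoop (backtracking : Bool) (stack : List (List Int × List Int × List Int)) (out : List (List Int × List Int)) : List (List Int × List Int) :=
  match stack with
  | [] => out
  | (rest, L, R) :: stk =>
    match rest with
    | [] => essLoop backtracking stk (if L.sum = R.sum then out ++ [(L, R)] else out)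
    | x :: tail =>
      if backtracking = true ∧ (L.sum - R.sum > x + tail.sum ∨ R.sum - L.sum > x + tail.sum) then
        essLoop backtracking stk out
      else
        essLoop backtracking ((tail, L ++ [x], R) :: (tail, L, R ++ [x]) :: stk) out
termination_by (stack.map (fun t => 3 ^ t.1.length)).sum
decreasing_by
  all_goals simp [pow_succ]
  have h3 : 0 < 3 ^ tail.length := by positivity
  omega

def ess_all_alt (data : List Int) (left : List Int) (right : List Int) (backtracking : Bool) : List (List Int × List Int) :=
  essLoop backtracking [(data, left, right)] []

-- ===== PRECONDITION & SPEC =====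
def Spec_ess_all (data : List Int) (left : List Int) (right : List Int) (backtracking : Bool) (out : List (List Int × List Int)) : Prop := out = ess_all_alt data left right backtracking
instance (data : List Int) (left : List Int) (right : List Int) (backtracking : Bool) (out : List (List Int × List Int)) : Decidable (Spec_ess_all data left right backtracking out) := by unfold Spec_ess_all; infer_instance

-- ===== CLAIM (what is proved, stated in full; the proofs are below) =====
def Claim_equal_ess_all : Prop := ∀ (data : List Int) (left : List Int) (right : List Int) (backtracking : Bool), Dom_ess_all data left right backtracking → Spec_ess_all data left right backtracking (ess_all data left right backtracking)

-- ===== LEMMAS AND PROOFS =====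

-- key invariant: popping one stack frame appends exactly A's result for that frame
theorem essLoop_frame (backtracking : Bool) (rest : List Int) :
    ∀ (L R : List Int) (stk : List (List Int × List Int × List Int)) (out : List (List Int × List Int)),
    essLoop backtracking ((rest, L, R) :: stk) out
      = essLoop backtracking stk (out ++ ess_all rest L R backtracking) := by
  induction rest with
  | nil =>
    intro L R stk out
    simp only [essLoop, ess_all]
    split <;> simp
  | cons x tail ih =>
    intro L R stk out
    simp only [essLoop]
    split
    · next h =>
      obtain ⟨hb, hc⟩ := h
      subst hb
      simp only [ess_all]
      rcases hc with hc | hc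
      · rw [if_pos hc]; simp
      · by_cases h1 : L.sum - R.sum > x + tail.sum
        · rw [if_pos h1]; simp
        · rw [if_neg h1, if_pos hc]; simp
    · next h =>
      rw [ih, ih]
      congr 1
      rw [List.append_assoc]
      congr 1
      cases backtracking with
      | false => simp [ess_all]
      | true =>
        have h1 : ¬ L.sum - R.sum > x + tail.sum := fun hc => h ⟨rfl, Or.inl hc⟩
        have h2 : ¬ R.sum - L.sum > x + tail.sum := fun hc => h ⟨rfl, Or.inr hc⟩
        simp only [ess_all, if_neg h1, if_neg h2]
        simp

-- ===== VERDICT (by name: the statement is the Claim_ definition above) =====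
theorem ess_all_spec : Claim_equal_ess_all := by
  intro data left right backtracking _
  unfold Spec_ess_all ess_all_alt
  rw [essLoop_frame]
  simp [essLoop]
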